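-- pv_equiv track=rewrite | github.com/amocsub/git_submodule_crawler | git_submodule_crawler.py | parse_gitmodules
-- ===== SOURCE A (Python) =====
-- def parse_gitmodules(text):
--     """Given a string text would parse it and return a list of all submodules referenced"""
--     modules = []
--     current = None
--
--     for line in text.split("\n"):
--         line = line.strip()
--
--         if line.startswith("[submodule"):
--             if current is not None:
--                 modules.append(current)
--
--             current = {"url": None, "path": None}
--
--         elif current is not None:
--             if line.startswith("url"):
--                 current["url"] = line.split("=")[1].strip()
--
--             elif line.startswith("path"):
--                 current['path'] = line.split("=")[1].strip()
--
--     if current is not None: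
--         modules.append(current)
--
--     return modules
-- ===== SOURCE B (Python) =====
-- def parse_gitmodules(text):
--     """Given a string text would parse it and return a list of all submodules referenced"""
--     lines = [l.strip() for l in text.split("\n")]
--
--     # phase 1: drop the preamble, then cut the lines into one body per header
--     while lines and not lines[0].startswith("[submodule"):
--         lines = lines[1:]
--     sections = []
--     while lines:
--         lines = lines[1:]  # drop the header line itself
--         body = []
--         while lines and not lines[0].startswith("[submodule"):
--             body.append(lines[0])
--             lines = lines[1:]
--         sections.append(body)
--
--     # phase 2: one dict per section
--     def entry(sec):
--         d = {"url": None, "path": None}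
--         for l in sec:
--             if l.startswith("url"):
--                 d["url"] = l.split("=")[1].strip()
--             elif l.startswith("path"):
--                 d["path"] = l.split("=")[1].strip()
--         return d
--
--     return [entry(sec) for sec in sections]
-- ===== Notes on version B (the rewrite author's own statement) =====
-- stated objective: alternative
-- what changed: Replaces A's single pass with a running current-dict and end-of-loop flush by a two-phase shape: first cut the stripped lines into per-header sections (drop the preamble, slice off a body per '[submodule' header), then map each section to its {'url','path'} dict.
import Mathlib
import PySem

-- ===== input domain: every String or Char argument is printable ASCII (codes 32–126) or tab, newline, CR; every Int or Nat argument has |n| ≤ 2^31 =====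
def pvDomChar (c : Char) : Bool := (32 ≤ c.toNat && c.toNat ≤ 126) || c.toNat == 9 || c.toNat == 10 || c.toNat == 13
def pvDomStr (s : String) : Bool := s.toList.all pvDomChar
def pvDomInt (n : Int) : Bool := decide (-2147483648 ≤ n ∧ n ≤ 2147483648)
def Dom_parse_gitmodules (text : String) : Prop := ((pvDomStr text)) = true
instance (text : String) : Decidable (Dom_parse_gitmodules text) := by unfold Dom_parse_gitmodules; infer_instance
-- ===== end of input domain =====

-- B replaces A's single pass with a flushed running dict by a two-phase shape (cut the
-- stripped lines into per-header sections, then build one dict per section); objective: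
-- alternative decomposition, same cost.

-- helpers shared by both ports: the per-line texts 'line.startswith("[submodule")' and
-- 'line.split("=")[1].strip()' and the update branches are textually identical in A and B.
def pvHeader (l : String) : Bool := PySem.Str.startswith l "[submodule"

-- line.split("=")[1].strip(); pyGet? is none exactly where Python raises IndexError
-- (no "=" in the line) — those inputs are excluded by Pre_; the .getD "" is unreachable inside Pre_.
def pvEqVal (l : String) : String :=
  PySem.Str.strip ((PySem.List.pyGet? ((PySem.Str.split? l "=").getD []) 1).getD "")

-- {"url": None, "path": None}
def pvInit : PySem.Dict String (Option String) :=
  PySem.Dict.ofList [("url", none), ("path", none)]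

-- the url/path elif branches (on an already-stripped, non-header line)
def pvUpd (d : PySem.Dict String (Option String)) (l : String) : PySem.Dict String (Option String) :=
  if PySem.Str.startswith l "url" then PySem.Dict.insert d "url" (some (pvEqVal l))
  else if PySem.Str.startswith l "path" then PySem.Dict.insert d "path" (some (pvEqVal l))
  else d

-- ===== PORT A =====
-- loop body of A, on the stripped line
def pvStep (st : List (PySem.Dict String (Option String)) × Option (PySem.Dict String (Option String)))
    (line : String) :
    List (PySem.Dict String (Option String)) × Option (PySem.Dict String (Option String)) :=
  if pvHeader line then
    match st.2 with
    | some c => (st.1 ++ [c], some pvInit)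
    | none => (st.1, some pvInit)
  else
    match st.2 with
    | some c => (st.1, some (pvUpd c line))
    | none => st

-- A's trailing flush and return (dicts rendered as assoc lists at the boundary)
def pvOut (r : List (PySem.Dict String (Option String)) × Option (PySem.Dict String (Option String))) :
    List (List (String × Option String)) :=
  (match r.2 with
   | some c => r.1 ++ [c]
   | none => r.1).map PySem.Dict.items

def parse_gitmodules (text : String) : List (List (String × Option String)) :=
  pvOut (((PySem.Str.split? text "\n").getD []).foldl
    (fun st line => pvStep st (PySem.Str.strip line)) ([], none))

-- ===== PORT B =====
def pvNotHeader (l : String) : Bool := !pvHeader l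

-- phase 1 inner loops: called with the header line at the front; body = lines up to the next header
def pvSections : List String → List (List String)
  | [] => []
  | _ :: t => t.takeWhile pvNotHeader :: pvSections (t.dropWhile pvNotHeader)
termination_by ls => ls.length
decreasing_by exact Nat.lt_succ_of_le (List.length_dropWhile_le _ _)

-- phase 2: one dict per section
def pvEntry (sec : List String) : List (String × Option String) :=
  (sec.foldl pvUpd pvInit).items

def parse_gitmodules_alt (text : String) : List (List (String × Option String)) :=
  let lines := ((PySem.Str.split? text "\n").getD []).map PySem.Str.strip
  (pvSections (lines.dropWhile pvNotHeader)).map pvEntry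

-- ===== PRECONDITION & SPEC =====
-- Pre_ excludes exactly the inputs on which A raises IndexError: a stripped line after the
-- first "[submodule" header that starts with "url" or "path" but contains no "=".
def Pre_parse_gitmodules (text : String) : Prop :=
  ∀ l ∈ (((PySem.Str.split? text "\n").getD []).map PySem.Str.strip).dropWhile
      (fun l => !PySem.Str.startswith l "[submodule"),
    (PySem.Str.startswith l "url" || PySem.Str.startswith l "path") = true →
    PySem.Str.isIn "=" l = true
instance (text : String) : Decidable (Pre_parse_gitmodules text) := by
  unfold Pre_parse_gitmodules; infer_instance

def pvWitness_parse_gitmodules : String := "x\n[submodule \"a\"]\n path = p \nurl=u"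

def Spec_parse_gitmodules (text : String) (out : List (List (String × Option String))) : Prop :=
  out = parse_gitmodules_alt text
instance (text : String) (out : List (List (String × Option String))) :
    Decidable (Spec_parse_gitmodules text out) := by unfold Spec_parse_gitmodules; infer_instance

-- ===== CLAIM (what is proved, stated in full; the proofs are below) =====
def Claim_equal_parse_gitmodules : Prop :=
  ∀ (text : String), Dom_parse_gitmodules text → Pre_parse_gitmodules text →
    Spec_parse_gitmodules text (parse_gitmodules text)

-- ===== LEMMAS AND PROOFS =====
-- A's fold, started with a live current dict c, yields the flushed prefix, then c folded
-- over the lines up to the next header, then B's sections of the rest.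
theorem pvFold_some (L : List String) :
    ∀ (ms : List (PySem.Dict String (Option String))) (c : PySem.Dict String (Option String)),
    pvOut (L.foldl pvStep (ms, some c)) =
      ms.map PySem.Dict.items ++
        ((L.takeWhile pvNotHeader).foldl pvUpd c).items ::
          (pvSections (L.dropWhile pvNotHeader)).map pvEntry := by
  induction L with
  | nil => intro ms c; simp [pvOut, pvSections]
  | cons l t ih =>
    intro ms c
    by_cases h : pvHeader l = true
    · have hn : pvNotHeader l = false := by simp [pvNotHeader, h]
      have e : pvStep (ms, some c) l = (ms ++ [c], some pvInit) := by simp [pvStep, h]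
      rw [List.foldl_cons, e, ih (ms ++ [c]) pvInit]
      simp [hn, pvSections, pvEntry]
    · have hn : pvNotHeader l = true := by simp [pvNotHeader, h]
      have e : pvStep (ms, some c) l = (ms, some (pvUpd c l)) := by simp [pvStep, h]
      rw [List.foldl_cons, e, ih ms (pvUpd c l)]
      simp [hn]

-- A's fold with no current dict yet yields exactly B's sections of the remaining lines.
theorem pvFold_none (L : List String) :
    ∀ (ms : List (PySem.Dict String (Option String))),
    pvOut (L.foldl pvStep (ms, none)) =
      ms.map PySem.Dict.items ++ (pvSections (L.dropWhile pvNotHeader)).map pvEntry := by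
  induction L with
  | nil => intro ms; simp [pvOut, pvSections]
  | cons l t ih =>
    intro ms
    by_cases h : pvHeader l = true
    · have hn : pvNotHeader l = false := by simp [pvNotHeader, h]
      have e : pvStep (ms, none) l = (ms, some pvInit) := by simp [pvStep, h]
      rw [List.foldl_cons, e, pvFold_some t ms pvInit]
      simp [hn, pvSections, pvEntry]
    · have hn : pvNotHeader l = true := by simp [pvNotHeader, h]
      have e : pvStep (ms, none) l = (ms, none) := by simp [pvStep, h]
      rw [List.foldl_cons, e, ih ms]
      simp [hn]

-- ===== VERDICT (by name: the statement is the Claim_ definition above) =====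
theorem parse_gitmodules_spec : Claim_equal_parse_gitmodules := by
  intro text _ _
  show parse_gitmodules text = parse_gitmodules_alt text
  unfold parse_gitmodules parse_gitmodules_alt
  rw [show (fun st line => pvStep st (PySem.Str.strip line))
        = fun (st : List (PySem.Dict String (Option String)) ×
                 Option (PySem.Dict String (Option String))) line =>
            pvStep st (PySem.Str.strip line) from rfl,
      ← List.foldl_map, pvFold_none]
  simp
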